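-- pv_equiv track=rewrite | github.com/natpaq/Reddit_Political_Analysis | get_user_active_subreddits.py | remove_political_subs
-- ===== SOURCE A (Python) =====
-- def remove_political_subs(input_dict):
--     political_subreddits = ['JoeBiden',
--                             'trump',
--                             'donaldtrump',
--                             'The_Donald',
--                             'Republican',
--                             'politics',
--                             'Conservative',
--                             'ConservativesOnly',
--                             'worldpolitics',
--                             'conservatives',
--                             'askaconservative',
--                             'ConservativeMemes',
--                             'PoliticalHumor',
--                             'PoliticalCompassMemes',
--                             'AskALiberal',
--                             'LadiesForTrump',
--                             'AskTrumpSupporters',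
--                             'Donald_Trump',
--                             'TrumpJR2020',
--                             'Trumpvirus',
--                             'TrumpCovidFailure',
--                             'hottiesfortrump',
--                             'TheTrumpZone',
--                             'DonaldTrump20',
--                             'EnoughTrumpSpam',
--                             'VotingForTrump',
--                             'real_trumpers',
--                             'Trumpgret',
--                             'DonaldJTrumpFanClub',
--                             'BlackVoicesForTrump',
--                             'bidenbro',
--                             'BidenRegret',
--                             'BidenIsFinished',
--                             'JoeBidenSucks',
--                             'ShitPoliticsSays',
--                             'PoliticalMemes',
--                             'ukpolitics',
--                             'PoliticalDiscussion',
--                             'TexasPolitics',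
--                             'Political_Tumor',
--                             'PoliticalVideo',
--                             'Liberal',
--                             'liberalgunowners',
--                             'democrats',
--                             'Kamala',
--                             'Pete_Buttigieg',
--                             'neoliberal',
--                             'LateStageCapitalism',
--                             'Impeach_Trump',
--                             'TheRightCantMeme',
--                             'The_Mueller',
--                             'WAlitics',
--                             'TheLeftCantMeme',
--                             'centrist',
--                             'LouderWithCrowder',
--                             'libertarianmeme',
--                             'Libertarian',
--                             'Enough_Sanders_Spam',
--                             'AmericanFascism2020',
--                             'YangForPresidentHQ',
--                             'AskConservatives',
--                             'HeckOffCommie',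
--                             'AskThe_Donald',
--                             'Democrats2020',
--                             'VoteDEM',
--                             'Forum_Democratie',
--                             'republicans',
--                             'POLYTICAL',
--                             'SandersForPresident',
--                             ]
--     for subreddit in political_subreddits:
--         input_dict.pop(subreddit, None) # i dont want to remove this and instead want to annotate it as political
--     return input_dict
-- ===== SOURCE B (Python) =====
-- _POLITICAL_NAME_LINES = [
--     "JoeBiden trump donaldtrump The_Donald Republican politics Conservative ConservativesOnly worldpolitics conservatives",
--     "askaconservative ConservativeMemes PoliticalHumor PoliticalCompassMemes AskALiberal LadiesForTrump AskTrumpSupporters Donald_Trump TrumpJR2020 Trumpvirus",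
--     "TrumpCovidFailure hottiesfortrump TheTrumpZone DonaldTrump20 EnoughTrumpSpam VotingForTrump real_trumpers Trumpgret DonaldJTrumpFanClub BlackVoicesForTrump",
--     "bidenbro BidenRegret BidenIsFinished JoeBidenSucks ShitPoliticsSays PoliticalMemes ukpolitics PoliticalDiscussion TexasPolitics Political_Tumor",
--     "PoliticalVideo Liberal liberalgunowners democrats Kamala Pete_Buttigieg neoliberal LateStageCapitalism Impeach_Trump TheRightCantMeme",
--     "The_Mueller WAlitics TheLeftCantMeme centrist LouderWithCrowder libertarianmeme Libertarian Enough_Sanders_Spam AmericanFascism2020 YangForPresidentHQ",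
--     "AskConservatives HeckOffCommie AskThe_Donald Democrats2020 VoteDEM Forum_Democratie republicans POLYTICAL SandersForPresident",
-- ]
--
-- POLITICAL_SUBREDDITS = frozenset(
--     name for line in _POLITICAL_NAME_LINES for name in line.split()
-- )
--
-- def remove_political_subs(input_dict):
--     # Mutates input_dict in place (same object returned, as in A):
--     # rebuild the dict keeping only non-political entries.
--     kept = {k: v for k, v in input_dict.items() if k not in POLITICAL_SUBREDDITS}
--     input_dict.clear()
--     input_dict.update(kept)
--     return input_dict
-- ===== Notes on version B (the rewrite author's own statement) =====
-- stated objective: idiomatic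
-- what changed: Inverts the traversal: instead of looping over the 69-name constant list calling dict.pop for each, B builds a frozenset of the names once (words split out of a few space-separated lines) and rebuilds the dict in one comprehension pass over its entries, keeping only non-political keys, then reinstalls it in place via clear/update so the same object is mutated and returned.
import Mathlib
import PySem

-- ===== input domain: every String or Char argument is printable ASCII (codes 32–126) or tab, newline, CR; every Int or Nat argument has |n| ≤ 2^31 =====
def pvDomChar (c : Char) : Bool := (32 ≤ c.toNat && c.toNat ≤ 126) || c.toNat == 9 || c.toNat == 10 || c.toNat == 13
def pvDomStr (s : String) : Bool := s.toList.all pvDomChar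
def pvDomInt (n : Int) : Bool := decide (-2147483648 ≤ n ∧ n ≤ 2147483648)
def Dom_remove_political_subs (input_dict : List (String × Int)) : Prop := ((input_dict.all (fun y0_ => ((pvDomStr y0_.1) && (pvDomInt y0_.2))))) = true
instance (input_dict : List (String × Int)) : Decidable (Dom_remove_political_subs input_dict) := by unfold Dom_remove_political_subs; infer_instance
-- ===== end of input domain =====

-- B replaces A's loop over the fixed name list (one dict.pop per name) with a frozenset built once
-- from space-separated name lines and a single filtering pass over the dict's entries (idiomatic);
-- the theorem is about the RETURN value (both Pythons also mutate the argument in place identically).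

-- ===== PORT A =====
-- A's fixed list of political subreddit names, in source order
def politicalSubreddits : List String :=
  ["JoeBiden",
   "trump",
   "donaldtrump",
   "The_Donald",
   "Republican",
   "politics",
   "Conservative",
   "ConservativesOnly",
   "worldpolitics",
   "conservatives",
   "askaconservative",
   "ConservativeMemes",
   "PoliticalHumor",
   "PoliticalCompassMemes",
   "AskALiberal",
   "LadiesForTrump",
   "AskTrumpSupporters",
   "Donald_Trump",
   "TrumpJR2020",
   "Trumpvirus",
   "TrumpCovidFailure",
   "hottiesfortrump",
   "TheTrumpZone",
   "DonaldTrump20",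
   "EnoughTrumpSpam",
   "VotingForTrump",
   "real_trumpers",
   "Trumpgret",
   "DonaldJTrumpFanClub",
   "BlackVoicesForTrump",
   "bidenbro",
   "BidenRegret",
   "BidenIsFinished",
   "JoeBidenSucks",
   "ShitPoliticsSays",
   "PoliticalMemes",
   "ukpolitics",
   "PoliticalDiscussion",
   "TexasPolitics",
   "Political_Tumor",
   "PoliticalVideo",
   "Liberal",
   "liberalgunowners",
   "democrats",
   "Kamala",
   "Pete_Buttigieg",
   "neoliberal",
   "LateStageCapitalism",
   "Impeach_Trump",
   "TheRightCantMeme",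
   "The_Mueller",
   "WAlitics",
   "TheLeftCantMeme",
   "centrist",
   "LouderWithCrowder",
   "libertarianmeme",
   "Libertarian",
   "Enough_Sanders_Spam",
   "AmericanFascism2020",
   "YangForPresidentHQ",
   "AskConservatives",
   "HeckOffCommie",
   "AskThe_Donald",
   "Democrats2020",
   "VoteDEM",
   "Forum_Democratie",
   "republicans",
   "POLYTICAL",
   "SandersForPresident"]

-- dict.pop(k, None): remove the (first) entry with key k, if any
def popKey (d : List (String × Int)) (k : String) : List (String × Int) :=
  match d with
  | [] => []
  | p :: t => if p.1 == k then t else p :: popKey t k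

def remove_political_subs (input_dict : List (String × Int)) : List (String × Int) :=
  politicalSubreddits.foldl (fun d subreddit => popKey d subreddit) input_dict

-- ===== PORT B =====
-- B's constant data: the names as space-separated lines …
def politicalNameLines : List String :=
  ["JoeBiden trump donaldtrump The_Donald Republican politics Conservative ConservativesOnly worldpolitics conservatives",
   "askaconservative ConservativeMemes PoliticalHumor PoliticalCompassMemes AskALiberal LadiesForTrump AskTrumpSupporters Donald_Trump TrumpJR2020 Trumpvirus",
   "TrumpCovidFailure hottiesfortrump TheTrumpZone DonaldTrump20 EnoughTrumpSpam VotingForTrump real_trumpers Trumpgret DonaldJTrumpFanClub BlackVoicesForTrump",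
   "bidenbro BidenRegret BidenIsFinished JoeBidenSucks ShitPoliticsSays PoliticalMemes ukpolitics PoliticalDiscussion TexasPolitics Political_Tumor",
   "PoliticalVideo Liberal liberalgunowners democrats Kamala Pete_Buttigieg neoliberal LateStageCapitalism Impeach_Trump TheRightCantMeme",
   "The_Mueller WAlitics TheLeftCantMeme centrist LouderWithCrowder libertarianmeme Libertarian Enough_Sanders_Spam AmericanFascism2020 YangForPresidentHQ",
   "AskConservatives HeckOffCommie AskThe_Donald Democrats2020 VoteDEM Forum_Democratie republicans POLYTICAL SandersForPresident"]

-- … split into words and collected into a frozenset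
def politicalSubredditSet : PySem.Set String :=
  PySem.Set.ofList (politicalNameLines.flatMap (fun line => PySem.Str.split₀ line))

-- the dict comprehension keeping only non-political entries
def remove_political_subs_alt (input_dict : List (String × Int)) : List (String × Int) :=
  input_dict.filter (fun p => !(politicalSubredditSet.contains p.1))

-- ===== PRECONDITION & SPEC =====
-- Pre_ states the dict invariant: association lists arising from a Python dict have no duplicate
-- keys; on duplicate-key lists (which no Python dict produces) A's pop removes only the first match
-- while B removes all, so such degenerate lists are outside the claim.
def Pre_remove_political_subs (input_dict : List (String × Int)) : Prop :=
  (input_dict.map Prod.fst).Nodup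
instance (input_dict : List (String × Int)) : Decidable (Pre_remove_political_subs input_dict) := by unfold Pre_remove_political_subs; infer_instance

def pvWitness_remove_political_subs : (List (String × Int)) := [("trump", 3), ("cats", 7)]

def Spec_remove_political_subs (input_dict : List (String × Int)) (out : List (String × Int)) : Prop := out = remove_political_subs_alt input_dict
instance (input_dict : List (String × Int)) (out : List (String × Int)) : Decidable (Spec_remove_political_subs input_dict out) := by unfold Spec_remove_political_subs; infer_instance

-- ===== CLAIM (what is proved, stated in full; the proofs are below) =====
def Claim_equal_remove_political_subs : Prop := ∀ (input_dict : List (String × Int)), Dom_remove_political_subs input_dict → Pre_remove_political_subs input_dict → Spec_remove_political_subs input_dict (remove_political_subs input_dict)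

-- ===== LEMMAS AND PROOFS =====

-- splitting B's name lines yields exactly A's name list
set_option maxRecDepth 100000 in
set_option maxHeartbeats 4000000 in
theorem flatMap_split_politicalNameLines :
    politicalNameLines.flatMap (fun line => PySem.Str.split₀ line) = politicalSubreddits := by rfl

-- on a duplicate-free association list, popping the first match removes every match
theorem popKey_eq_filter (d : List (String × Int)) (k : String)
    (h : (d.map Prod.fst).Nodup) :
    popKey d k = d.filter (fun p => !(p.1 == k)) := by
  induction d with
  | nil => rfl
  | cons p t ih =>
    simp only [List.map_cons, List.nodup_cons] at h
    by_cases hk : p.1 = k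
    · rw [show popKey (p :: t) k = t by simp [popKey, hk],
        List.filter_cons_of_neg (by simp [hk])]
      exact (List.filter_eq_self.2 (fun q hq => by
        simp only [Bool.not_eq_eq_eq_not, Bool.not_true, beq_eq_false_iff_ne, ne_eq]
        intro hq1
        exact h.1 (hk ▸ hq1 ▸ List.mem_map_of_mem hq))).symm
    · simp [popKey, hk, ih h.2, beq_iff_eq]

theorem nodup_keys_filter (d : List (String × Int)) (q : String × Int → Bool)
    (h : (d.map Prod.fst).Nodup) : ((d.filter q).map Prod.fst).Nodup := by
  exact h.sublist (List.Sublist.map Prod.fst List.filter_sublist)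

theorem foldl_popKey_eq_filter (names : List String) (d : List (String × Int))
    (h : (d.map Prod.fst).Nodup) :
    names.foldl (fun d s => popKey d s) d = d.filter (fun p => !(names.contains p.1)) := by
  induction names generalizing d with
  | nil => simp
  | cons n ns ih =>
    simp only [List.foldl_cons]
    rw [popKey_eq_filter d n h, ih _ (nodup_keys_filter d _ h), List.filter_filter]
    apply List.filter_congr
    intro p _
    simp only [List.contains_cons, Bool.not_or, Bool.and_comm]

-- ===== VERDICT (by name: the statement is the Claim_ definition above) =====
theorem remove_political_subs_spec : Claim_equal_remove_political_subs := by
  intro input_dict _ hpre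
  unfold Spec_remove_political_subs remove_political_subs remove_political_subs_alt
  rw [foldl_popKey_eq_filter _ _ hpre]
  apply List.filter_congr
  intro p _
  simp only [politicalSubredditSet, flatMap_split_politicalNameLines,
    PySem.Set.contains_eq_listContains, List.contains_eq_mem, PySem.Set.mem_ofList]
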